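-- pv_equiv track=rewrite | github.com/BocilBlunder/TUBES-TBFO | src/checker.py | tokenize_pda
-- ===== SOURCE A (Python) =====
-- tokens = [
-- '</',
-- '-->',
-- '<!--',
-- '<',
-- '>',
-- 'html',
-- 'head',
-- 'body',
-- 'alt=',
-- 'any',
-- 'title',
-- 'link',
-- 'href=',
-- 'rel=',
-- '"',
-- "'",
-- 'script',
-- 'src=',
-- 'h1',
-- 'h2',
-- 'h3',
-- 'h4',
-- 'h5',
-- 'h6',
-- 'table',
-- 'tr',
-- 'th',
-- 'td',
-- 'br',
-- 'div',
-- 'abbr',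
-- 'strong',
-- 'small',
-- 'hr',
-- 'img',
-- 'form',
-- 'method=',
-- 'action=',
-- 'POST',
-- 'GET',
-- 'button',
-- 'type=',
-- 'submit',
-- 'reset',
-- 'input',
-- 'text',
-- 'password',
-- 'email',
-- 'number',
-- 'checkbox',
-- 'p',
-- 'b',
-- 'a',
-- 'em',
-- 'id=',
-- 'class=',
-- 'style='
-- ]
--
-- def tokenize_pda(input):
--     output = []
--
--     while (input != ""):
--         found_token = False
--         for token in tokens:
--             if input.startswith(token):
--                 output.append(token)
--                 token_length = len(token)
--                 input = input[token_length:]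
--                 found_token = True
--                 break
--
--         if (not(found_token)):
--             if (not(input[0] == ' ' or input[0] == '\n')):
--                 output.append(input[0])
--             input = input[1:]
--
--     return output
-- ===== SOURCE B (Python) =====
-- tokens = [
-- '</',
-- '-->',
-- '<!--',
-- '<',
-- '>',
-- 'html',
-- 'head',
-- 'body',
-- 'alt=',
-- 'any',
-- 'title',
-- 'link',
-- 'href=',
-- 'rel=',
-- '"',
-- "'",
-- 'script',
-- 'src=',
-- 'h1',
-- 'h2',
-- 'h3',
-- 'h4',
-- 'h5',
-- 'h6',
-- 'table',
-- 'tr',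
-- 'th',
-- 'td',
-- 'br',
-- 'div',
-- 'abbr',
-- 'strong',
-- 'small',
-- 'hr',
-- 'img',
-- 'form',
-- 'method=',
-- 'action=',
-- 'POST',
-- 'GET',
-- 'button',
-- 'type=',
-- 'submit',
-- 'reset',
-- 'input',
-- 'text',
-- 'password',
-- 'email',
-- 'number',
-- 'checkbox',
-- 'p',
-- 'b',
-- 'a',
-- 'em',
-- 'id=',
-- 'class=',
-- 'style='
-- ]
--
-- # Tokens grouped once by first character, keeping the priority order inside
-- # each bucket; since a token can only match when its first character equals
-- # the current character, trying only the bucket is equivalent to trying all.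
-- _buckets = {}
-- for _t in tokens:
--     _buckets.setdefault(_t[0], []).append(_t)
--
--
-- def tokenize_pda(input):
--     output = []
--     i = 0
--     n = len(input)
--     while i < n:
--         c = input[i]
--         matched = None
--         for t in _buckets.get(c, ()):
--             if input.startswith(t, i):
--                 matched = t
--                 break
--         if matched is not None:
--             output.append(matched)
--             i += len(matched)
--         elif c != ' ' and c != '\n':
--             output.append(c)
--             i += 1
--         else:
--             i += 1
--     return output
-- ===== Notes on version B (the rewrite author's own statement) =====
-- stated objective: faster
-- what changed: Replaces the per-position scan of all 57 tokens combined with repeated string slicing (input = input[k:]) by a single index-based pass that advances a cursor over the unchanged string and, at each position, tries only the tokens pre-grouped once into first-character buckets (priority order preserved inside each bucket), which is equivalent because a token can only match where its first character equals the current character.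
import Mathlib
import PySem

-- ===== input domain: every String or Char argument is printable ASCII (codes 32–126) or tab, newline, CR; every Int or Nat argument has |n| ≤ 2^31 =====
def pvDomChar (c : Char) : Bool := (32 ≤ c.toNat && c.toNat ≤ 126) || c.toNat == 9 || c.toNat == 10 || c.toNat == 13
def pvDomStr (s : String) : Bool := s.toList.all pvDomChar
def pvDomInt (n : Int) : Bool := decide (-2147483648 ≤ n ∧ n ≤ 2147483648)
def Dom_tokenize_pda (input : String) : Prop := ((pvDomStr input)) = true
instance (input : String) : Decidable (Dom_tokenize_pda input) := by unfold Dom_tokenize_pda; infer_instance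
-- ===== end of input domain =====

-- B replaces A's repeated-slicing scan of all tokens by a single cursor pass trying only the
-- tokens pre-bucketed by first character (measured faster; mechanism: no string copies, smaller scan).


-- ===== PORT A =====
-- the module-level constant 'tokens'
def tokensStr : List String :=
  ["</", "-->", "<!--", "<", ">", "html", "head", "body", "alt=", "any", "title", "link",
   "href=", "rel=", "\"", "'", "script", "src=", "h1", "h2", "h3", "h4", "h5", "h6",
   "table", "tr", "th", "td", "br", "div", "abbr", "strong", "small", "hr", "img", "form",
   "method=", "action=", "POST", "GET", "button", "type=", "submit", "reset", "input",
   "text", "password", "email", "number", "checkbox", "p", "b", "a", "em", "id=",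
   "class=", "style="]

-- the same tokens as char lists (ports work on List Char)
def tokensL : List (List Char) := tokensStr.map String.toList

-- every token is a nonempty string (needed by both ports' termination)
theorem tokensL_ne_nil : ∀ t ∈ tokensL, t ≠ [] := by decide

-- A's while loop: 'for token in tokens: if input.startswith(token): break' is the first
-- match of the ordered token list; 'input = input[k:]' is the slice primitive.
def goA : List Char → List String
  | [] => []                                   -- while input != ""
  | c :: rest =>
    match h : tokensL.find? (fun t => PySem.Chars.startswith (c :: rest) t) with
    | some t =>
        -- output.append(token); input = input[len(token):]
        String.ofList t :: goA (PySem.List.slice (c :: rest) (some (t.length : Int)) none)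
    | none =>
        -- input[0] is c (input nonempty); input = input[1:]
        if c = ' ' ∨ c = '\n' then goA rest
        else String.ofList [c] :: goA rest
termination_by cs => cs.length
decreasing_by
  · rw [PySem.List.slice_from_natCast]
    have ht : t ∈ tokensL := List.mem_of_find?_eq_some h
    have hpos : 0 < t.length := List.length_pos_iff.mpr (tokensL_ne_nil t ht)
    simp [List.length_drop]; omega
  · simp
  · simp

def tokenize_pda (input : String) : List String := goA input.toList

-- ===== PORT B =====
-- buckets.setdefault(t[0], []).append(t)
def bucketStep (d : PySem.Dict Char (List (List Char))) (t : List Char) :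
    PySem.Dict Char (List (List Char)) :=
  match t with
  | [] => d
  | a :: _ => d.insert a (d.getD a [] ++ [t])

-- the module-level '_buckets' dict, built once from 'tokens'
def bucketsB : PySem.Dict Char (List (List Char)) := tokensL.foldl bucketStep PySem.Dict.empty

-- needed for goB's termination: the bucket of c holds the tokens whose first character is c
theorem getD_foldl_bucketStep (ts : List (List Char)) (d : PySem.Dict Char (List (List Char)))
    (c : Char) :
    (ts.foldl bucketStep d).getD c [] = d.getD c [] ++ ts.filter (fun t => t.head? == some c) := by
  induction ts generalizing d with
  | nil => simp
  | cons t ts ih =>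
    cases t with
    | nil => simpa [bucketStep] using ih d
    | cons a tb =>
      rw [List.foldl_cons, ih]
      by_cases hc : c = a
      · subst hc
        simp [bucketStep]
      · have hac : (a = c) = False := by simp [Ne.symm hc]
        simp [bucketStep, PySem.Dict.getD_insert, hc, hac]

theorem mem_bucketsB_getD {c : Char} {t : List Char} (h : t ∈ bucketsB.getD c []) :
    t ∈ tokensL := by
  rw [bucketsB, getD_foldl_bucketStep] at h
  simp only [PySem.Dict.getD_empty, List.nil_append] at h
  exact List.mem_of_mem_filter h

set_option maxRecDepth 4096 in
-- B's while loop over the cursor i; input.startswith(t, i) is startswith of the i-suffix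
-- (exact for 0 ≤ i ≤ len(input)); buckets.get(c, ()) is bucketsB.getD c [].
def goB (cs : List Char) (n : Nat) (i : Nat) : List String :=
  if hn : i < n then
    match PySem.List.pyGet? cs (i : Int) with   -- c = input[i]
    | none => []                                 -- unreachable: i < n = len(input)
    | some c =>
      match h : (bucketsB.getD c []).find? (fun t => PySem.Chars.startswith (cs.drop i) t) with
      | some t => String.ofList t :: goB cs n (i + t.length)
      | none =>
        if c ≠ ' ' ∧ c ≠ '\n' then String.ofList [c] :: goB cs n (i + 1)
        else goB cs n (i + 1)
  else []
termination_by n - i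
decreasing_by
  · have ht : t ∈ tokensL := mem_bucketsB_getD (List.mem_of_find?_eq_some h)
    have hpos : 0 < t.length := List.length_pos_iff.mpr (tokensL_ne_nil t ht)
    omega
  · omega
  · omega

def tokenize_pda_alt (input : String) : List String :=
  goB input.toList input.toList.length 0       -- n = len(input); i = 0

-- ===== PRECONDITION & SPEC =====
def Spec_tokenize_pda (input : String) (out : List String) : Prop := out = tokenize_pda_alt input
instance (input : String) (out : List String) : Decidable (Spec_tokenize_pda input out) := by unfold Spec_tokenize_pda; infer_instance

-- ===== CLAIM (what is proved, stated in full; the proofs are below) =====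
def Claim_equal_tokenize_pda : Prop := ∀ (input : String), Dom_tokenize_pda input → Spec_tokenize_pda input (tokenize_pda input)

-- ===== LEMMAS AND PROOFS =====

-- one-step equations for goA
theorem goA_cons_eq_some (c : Char) (rest t : List Char)
    (h : tokensL.find? (fun t => PySem.Chars.startswith (c :: rest) t) = some t) :
    goA (c :: rest) = String.ofList t :: goA ((c :: rest).drop t.length) := by
  rw [goA]
  split
  · rename_i t' heq
    rw [h] at heq
    cases heq
    rw [PySem.List.slice_from_natCast]
  · rename_i heq
    rw [h] at heq
    cases heq

theorem goA_cons_eq_none (c : Char) (rest : List Char)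
    (h : tokensL.find? (fun t => PySem.Chars.startswith (c :: rest) t) = none) :
    goA (c :: rest) = if c = ' ' ∨ c = '\n' then goA rest else String.ofList [c] :: goA rest := by
  rw [goA]
  split
  · rename_i t' heq
    rw [h] at heq
    cases heq
  · rfl

-- one-step equations for goB
theorem goB_eq_some (cs : List Char) (n i : Nat) (c : Char) (t : List Char)
    (hn : i < n) (hc : PySem.List.pyGet? cs (i : Int) = some c)
    (h : (bucketsB.getD c []).find? (fun t => PySem.Chars.startswith (cs.drop i) t) = some t) :
    goB cs n i = String.ofList t :: goB cs n (i + t.length) := by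
  rw [goB, dif_pos hn, hc]
  dsimp only
  split
  · rename_i t' heq
    rw [h] at heq
    cases heq
    rfl
  · rename_i heq
    rw [h] at heq
    cases heq

theorem goB_eq_none (cs : List Char) (n i : Nat) (c : Char)
    (hn : i < n) (hc : PySem.List.pyGet? cs (i : Int) = some c)
    (h : (bucketsB.getD c []).find? (fun t => PySem.Chars.startswith (cs.drop i) t) = none) :
    goB cs n i = if c ≠ ' ' ∧ c ≠ '\n' then String.ofList [c] :: goB cs n (i + 1)
                 else goB cs n (i + 1) := by
  rw [goB, dif_pos hn, hc]
  dsimp only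
  split
  · rename_i t' heq
    rw [h] at heq
    cases heq
  · rfl

-- dropping elements on which p fails does not change the first p-match
theorem find?_filter_of_imp {α : Type} (l : List α) (p q : α → Bool)
    (h : ∀ x ∈ l, p x = true → q x = true) :
    (l.filter q).find? p = l.find? p := by
  induction l with
  | nil => rfl
  | cons x l ih =>
    by_cases hq : q x = true
    · simp only [List.filter_cons, hq, if_true, List.find?_cons]
      cases hp : p x
      · exact ih (fun y hy => h y (List.mem_cons_of_mem x hy))
      · rfl
    · have hp : p x = false := by
        cases hpx : p x
        · rfl
        · exact absurd (h x (List.mem_cons_self) hpx) hq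
      simp only [List.filter_cons, hq, List.find?_cons, hp]
      exact ih (fun y hy => h y (List.mem_cons_of_mem x hy))

-- trying only the bucket of the current character finds the same first token
theorem find_buckets_eq (c : Char) (rest : List Char) :
    (bucketsB.getD c []).find? (fun t => PySem.Chars.startswith (c :: rest) t)
      = tokensL.find? (fun t => PySem.Chars.startswith (c :: rest) t) := by
  rw [bucketsB, getD_foldl_bucketStep]
  simp only [PySem.Dict.getD_empty, List.nil_append]
  apply find?_filter_of_imp
  intro t ht hp
  obtain ⟨a, tb, rfl⟩ : ∃ a tb, t = a :: tb := by
    cases t with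
    | nil => exact absurd rfl (tokensL_ne_nil [] ht)
    | cons a tb => exact ⟨a, tb, rfl⟩
  have hpre : (a :: tb) <+: (c :: rest) := (PySem.Chars.startswith_iff _ _).mp hp
  have hac : a = c := (List.cons_prefix_cons.mp hpre).1
  simp [hac]

set_option maxRecDepth 8192 in
theorem goA_eq_goB (cs : List Char) :
    ∀ k i, cs.length - i = k → goA (cs.drop i) = goB cs cs.length i := by
  intro k
  induction k using Nat.strong_induction_on with
  | _ k ih =>
    intro i hk
    by_cases hi : i < cs.length
    · have hd : cs.drop i = cs[i] :: cs.drop (i + 1) := List.drop_eq_getElem_cons hi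
      have hget : PySem.List.pyGet? cs (i : Int) = some cs[i] := by
        simp [List.getElem?_eq_getElem hi]
      have heqfind := find_buckets_eq cs[i] (cs.drop (i + 1))
      rw [← hd] at heqfind
      cases hfind : tokensL.find? (fun t => PySem.Chars.startswith (cs.drop i) t) with
      | some t =>
        have ht : t ∈ tokensL := List.mem_of_find?_eq_some hfind
        have hpos : 0 < t.length := List.length_pos_iff.mpr (tokensL_ne_nil t ht)
        rw [goB_eq_some cs cs.length i cs[i] t hi hget (by rw [heqfind, hfind])]
        rw [hd] at hfind
        rw [hd, goA_cons_eq_some _ _ _ hfind, ← hd, List.drop_drop]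
        rw [ih (cs.length - (i + t.length)) (by omega) (i + t.length) rfl]
      | none =>
        rw [goB_eq_none cs cs.length i cs[i] hi hget (by rw [heqfind, hfind])]
        rw [hd] at hfind
        rw [hd, goA_cons_eq_none _ _ hfind]
        by_cases hc : cs[i] = ' ' ∨ cs[i] = '\n'
        · rw [if_pos hc, if_neg (by tauto)]
          exact ih (cs.length - (i + 1)) (by omega) (i + 1) rfl
        · rw [if_neg hc, if_pos (by tauto)]
          rw [ih (cs.length - (i + 1)) (by omega) (i + 1) rfl]
    · rw [goB, dif_neg hi]
      rw [List.drop_eq_nil_of_le (by omega)]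
      rw [goA]

-- ===== VERDICT (by name: the statement is the Claim_ definition above) =====
theorem tokenize_pda_spec : Claim_equal_tokenize_pda := by
  intro input _
  unfold Spec_tokenize_pda tokenize_pda tokenize_pda_alt
  simpa using goA_eq_goB input.toList input.toList.length 0 rfl
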